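-- pv_equiv track=rewrite | github.com/pickettbd/basicAsmStatsCalcInPy | calc.py | extractNlens
-- ===== SOURCE A (Python) =====
-- def extractNlens(seq):
--
-- 	n_lens = []
--
-- 	n_len = 0
-- 	i = 0
-- 	while i < len(seq):
--
-- 		while i < len(seq) and seq[i] == 'N':
-- 			n_len += 1
-- 			i += 1
--
-- 		if n_len > 0:
-- 			n_lens.append(n_len)
-- 			n_len = 0
--
-- 		i += 1
--
-- 	return n_lens
-- ===== SOURCE B (Python) =====
-- def extractNlens(seq):
--     n = len(seq)
--     starts = [i for i in range(n) if seq[i] == 'N' and (i == 0 or seq[i-1] != 'N')]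
--     ends = [i for i in range(n) if seq[i] == 'N' and (i == n-1 or seq[i+1] != 'N')]
--     return [e - s + 1 for s, e in zip(starts, ends)]
-- ===== Notes on version B (the rewrite author's own statement) =====
-- stated objective: faster
-- what changed: Replaces A's single-pass run-counting scan (nested while loops incrementing a counter per character) by boundary detection: two comprehensions collect the indices where an N-run starts and where it ends (via neighbour comparisons), and lengths are obtained arithmetically as end - start + 1 over zip(starts, ends); the per-character work moves into C-level comprehension machinery, a constant-factor speedup.
import Mathlib
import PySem

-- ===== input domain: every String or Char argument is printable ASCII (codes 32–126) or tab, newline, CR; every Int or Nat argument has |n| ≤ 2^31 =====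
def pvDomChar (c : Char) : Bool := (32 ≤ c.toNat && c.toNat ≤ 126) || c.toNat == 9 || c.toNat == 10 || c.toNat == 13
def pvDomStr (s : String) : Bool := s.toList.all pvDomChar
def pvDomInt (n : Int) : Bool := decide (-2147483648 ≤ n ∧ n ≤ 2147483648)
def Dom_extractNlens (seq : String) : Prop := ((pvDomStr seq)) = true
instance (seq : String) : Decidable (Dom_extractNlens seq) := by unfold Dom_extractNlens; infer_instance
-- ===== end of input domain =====

-- B replaces A's run-counting scan by boundary detection: collect run-start and run-end indices, lengths = end - start + 1.

-- ===== PORT A =====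
-- inner while loop: consume leading 'N' characters of the suffix, counting them
def pvInnerA : List Char → Nat → List Char × Nat
  | [], n => ([], n)
  | c :: t, n => if c = 'N' then pvInnerA t (n + 1) else (c :: t, n)

theorem pvInnerA_len : ∀ (l : List Char) (n : Nat), (pvInnerA l n).1.length ≤ l.length
  | [], _ => Nat.le_refl _
  | c :: t, n => by
    simp only [pvInnerA]
    split
    · exact Nat.le_trans (pvInnerA_len t (n + 1)) (Nat.le_succ _)
    · exact Nat.le_refl _

-- outer while loop: i is represented by the remaining suffix of seq
def pvOuterA (l : List Char) (acc : List Int) : List Int :=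
  match l with
  | [] => acc
  | c :: t =>
    let p := pvInnerA (c :: t) 0
    let acc' := if p.2 > 0 then acc ++ [(p.2 : Int)] else acc
    pvOuterA (p.1.drop 1) acc'
termination_by l.length
decreasing_by
  simp only [List.length_drop]
  have h := pvInnerA_len (c :: t) 0
  simp only [List.length_cons] at h ⊢
  omega

def extractNlens (seq : String) : List Int := pvOuterA seq.toList []

-- ===== PORT B =====
-- seq[i] / seq[i-1] / seq[i+1] in Source B are always guarded in range, so getD with a
-- default (' ', never compared equal to 'N' at an out-of-range use) is exact.
def pvStartP (l : List Char) (i : Nat) : Bool :=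
  (l.getD i ' ' == 'N') && (i == 0 || l.getD (i - 1) ' ' != 'N')

def pvEndP (l : List Char) (i : Nat) : Bool :=
  (l.getD i ' ' == 'N') && (i == l.length - 1 || l.getD (i + 1) ' ' != 'N')

def extractNlens_alt (seq : String) : List Int :=
  let l := seq.toList
  let starts := (List.range l.length).filter (pvStartP l)
  let ends := (List.range l.length).filter (pvEndP l)
  List.zipWith (fun (s e : Nat) => (e : Int) - (s : Int) + 1) starts ends

-- ===== PRECONDITION & SPEC =====
def Spec_extractNlens (seq : String) (out : List Int) : Prop := out = extractNlens_alt seq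
instance (seq : String) (out : List Int) : Decidable (Spec_extractNlens seq out) := by unfold Spec_extractNlens; infer_instance

-- ===== CLAIM (what is proved, stated in full; the proofs are below) =====
def Claim_equal_extractNlens : Prop := ∀ (seq : String), Dom_extractNlens seq → Spec_extractNlens seq (extractNlens seq)

-- ===== LEMMAS AND PROOFS =====

-- canonical form of the result: lengths of maximal 'N' runs, structurally on the list
def pvF (l : List Char) : List Int :=
  match l with
  | [] => []
  | c :: t =>
    if c = 'N' then ((t.takeWhile (· = 'N')).length + 1 : Int) :: pvF (t.dropWhile (· = 'N'))
    else pvF t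
termination_by l.length
decreasing_by
  · have h := List.length_dropWhile_le (p := (· = 'N')) (l := t)
    simp only [List.length_cons]; omega
  · simp

theorem pvInnerA_spec : ∀ (l : List Char) (n : Nat),
    pvInnerA l n = (l.dropWhile (· = 'N'), n + (l.takeWhile (· = 'N')).length)
  | [], n => by simp [pvInnerA]
  | c :: t, n => by
    by_cases h : c = 'N'
    · simp [pvInnerA, h, pvInnerA_spec t (n + 1)]
      omega
    · simp [pvInnerA, h]

theorem head_dropWhile_ne {p : Char → Bool} : ∀ (l : List Char) {d : Char} {t' : List Char},
    l.dropWhile p = d :: t' → p d = false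
  | [], _, _, h => by simp at h
  | c :: t, d, t', h => by
    rw [List.dropWhile_cons] at h
    split at h
    · exact head_dropWhile_ne t h
    · cases h; exact Bool.eq_false_iff.mpr ‹_›

theorem pvOuterA_eq (l : List Char) (acc : List Int) : pvOuterA l acc = acc ++ pvF l := by
  induction hn : l.length using Nat.strong_induction_on generalizing l acc with
  | _ n ih =>
  match l with
  | [] => simp [pvOuterA, pvF]
  | c :: t =>
    by_cases h : c = 'N'
    · subst h
      rw [pvOuterA]
      simp only [pvInnerA_spec]
      simp only [List.takeWhile_cons, List.dropWhile_cons, decide_true, if_true,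
        List.length_cons, Nat.zero_add]
      rw [if_pos (Nat.succ_pos _)]
      have hlen := List.length_dropWhile_le (p := (· = 'N')) (l := t)
      cases hr : t.dropWhile (· = 'N') with
      | nil =>
        simp only [List.drop_nil]
        rw [pvOuterA, pvF, if_pos rfl, hr, pvF]
        push_cast
        simp
      | cons d t' =>
        have hd : d ≠ 'N' := by
          have := head_dropWhile_ne (p := (· = 'N')) t hr
          simpa using this
        simp only [List.drop_one, List.tail_cons]
        have ht' : t'.length < n := by
          rw [hr] at hlen
          simp only [List.length_cons] at hlen hn
          omega
        rw [ih t'.length ht' t' _ rfl]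
        rw [pvF, if_pos rfl, hr, pvF, if_neg hd]
        push_cast
        simp
    · rw [pvOuterA]
      simp only [pvInnerA_spec]
      simp only [List.takeWhile_cons, List.dropWhile_cons, decide_eq_true_eq, if_neg h]
      simp only [List.drop_one, List.tail_cons, List.length_nil, Nat.add_zero,
        gt_iff_lt, Nat.lt_irrefl, if_false]
      have ht : t.length < n := by simp at hn; omega
      rw [ih t.length ht t acc rfl, pvF, if_neg h]

-- recursive characterisations of the start/end index lists (proof helpers only)
def pvSg (prevN : Bool) : List Char → List Nat
  | [] => []
  | c :: t => (if (c == 'N') && !prevN then [0] else []) ++ (pvSg (c == 'N') t).map (· + 1)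

def pvEg : List Char → List Nat
  | [] => []
  | c :: t => (if (c == 'N') && (t.getD 0 ' ' != 'N') then [0] else []) ++ (pvEg t).map (· + 1)

-- start predicate with an explicit "previous char was 'N'" flag
def pvSQ (prevN : Bool) (l : List Char) (i : Nat) : Bool :=
  (l.getD i ' ' == 'N') && (if i == 0 then !prevN else l.getD (i - 1) ' ' != 'N')

theorem pvSQ_false (l : List Char) (i : Nat) : pvStartP l i = pvSQ false l i := by
  cases i <;> simp [pvStartP, pvSQ]

theorem pvSQ_succ (prevN : Bool) (c : Char) (t : List Char) (i : Nat) :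
    pvSQ prevN (c :: t) (i + 1) = pvSQ (c == 'N') t i := by
  cases i <;> simp [pvSQ, bne]

theorem filter_range_SQ : ∀ (l : List Char) (prevN : Bool),
    (List.range l.length).filter (pvSQ prevN l) = pvSg prevN l
  | [], _ => rfl
  | c :: t, prevN => by
    rw [List.length_cons, List.range_succ_eq_map, List.filter_cons, List.filter_map]
    have hc : (pvSQ prevN (c :: t)) ∘ Nat.succ = pvSQ (c == 'N') t := by
      funext i; exact pvSQ_succ prevN c t i
    rw [hc, filter_range_SQ t (c == 'N'), pvSg]
    have h0 : pvSQ prevN (c :: t) 0 = ((c == 'N') && !prevN) := by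
      simp [pvSQ]
    rw [h0]
    cases hb : ((c == 'N') && !prevN) <;> simp [Nat.succ_eq_add_one]

theorem pvEndP_succ (c : Char) (t : List Char) (i : Nat) (hi : i < t.length) :
    pvEndP (c :: t) (i + 1) = pvEndP t i := by
  have h2 : ((i + 1 : Nat) == t.length) = (i == t.length - 1) := by
    by_cases h : i + 1 = t.length
    · have : i = t.length - 1 := by omega
      simp [h, this]
      omega
    · have : i ≠ t.length - 1 := by omega
      simp [h, this]
  simp only [pvEndP, List.getD_cons_succ, List.length_cons, Nat.add_sub_cancel]
  rw [h2]

theorem filter_range_E : ∀ (l : List Char),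
    (List.range l.length).filter (pvEndP l) = pvEg l
  | [] => rfl
  | c :: t => by
    rw [List.length_cons, List.range_succ_eq_map, List.filter_cons, List.filter_map]
    have hc : (List.range t.length).filter ((pvEndP (c :: t)) ∘ Nat.succ)
        = (List.range t.length).filter (pvEndP t) := by
      apply List.filter_congr
      intro i hi
      exact pvEndP_succ c t i (List.mem_range.mp hi)
    rw [hc, filter_range_E t]
    have h0 : pvEndP (c :: t) 0 = ((c == 'N') && (t.getD 0 ' ' != 'N')) := by
      cases t <;> simp [pvEndP]
    rw [h0, pvEg]
    cases hb : ((c == 'N') && (t.getD 0 ' ' != 'N')) <;> simp [Nat.succ_eq_add_one]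

-- shifting both index lists by k does not change the differences
theorem zipShift : ∀ (S E : List Nat) (k : Nat),
    List.zipWith (fun (s e : Nat) => (e : Int) - (s : Int) + 1) (S.map (· + k)) (E.map (· + k))
      = List.zipWith (fun (s e : Nat) => (e : Int) - (s : Int) + 1) S E
  | [], _, _ => by simp
  | _ :: _, [], _ => by simp
  | s :: S, e :: E, k => by
    simp only [List.map_cons, List.zipWith_cons_cons, zipShift S E k]
    congr 1
    push_cast
    ring

theorem map_add_add : ∀ (L : List Nat) (a b : Nat),
    (L.map (· + a)).map (· + b) = L.map (· + (a + b))
  | [], _, _ => rfl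
  | x :: L, a, b => by
    simp only [List.map_cons, map_add_add L a b, List.cons.injEq, and_true]
    omega

theorem pvSg_allN : ∀ (ws rest : List Char), (∀ x ∈ ws, x = 'N') →
    pvSg true (ws ++ rest) = (pvSg true rest).map (· + ws.length)
  | [], rest, _ => by simp
  | c :: ws, rest, h => by
    have hc : c = 'N' := h c (List.mem_cons_self ..)
    simp only [List.cons_append, pvSg, hc, beq_self_eq_true, Bool.not_true,
      Bool.and_false, if_false, List.nil_append]
    rw [pvSg_allN ws rest (fun x hx => h x (List.mem_cons_of_mem _ hx)), map_add_add]
    simp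

theorem pvSg_true_eq_false (rest : List Char) (h : rest.getD 0 ' ' ≠ 'N') :
    pvSg true rest = pvSg false rest := by
  cases rest with
  | nil => rfl
  | cons d t =>
    have hd : (d == 'N') = false := by simpa using h
    simp [pvSg, hd]

theorem pvEg_run : ∀ (ws rest : List Char), (∀ x ∈ ws, x = 'N') → rest.getD 0 ' ' ≠ 'N' →
    pvEg (ws ++ 'N' :: rest) = ws.length :: (pvEg rest).map (· + (ws.length + 1))
  | [], rest, _, hr => by
    have hr' : ¬ rest[0]?.getD ' ' = 'N' := by simpa [List.getD] using hr
    simp [pvEg, hr']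
  | c :: ws, rest, h, hr => by
    have hc : c = 'N' := h c (List.mem_cons_self ..)
    have hhead : ((ws ++ 'N' :: rest).getD 0 ' ' != 'N') = false := by
      cases ws with
      | nil => simp
      | cons d t => simp [h d (by simp)]
    simp only [List.cons_append, pvEg, hc, beq_self_eq_true, hhead,
      Bool.and_false, if_false, List.nil_append]
    rw [pvEg_run ws rest (fun x hx => h x (List.mem_cons_of_mem _ hx)) hr]
    simp only [List.map_cons, map_add_add, List.length_cons]
    simp

theorem consN_eq_append : ∀ (ws : List Char), (∀ x ∈ ws, x = 'N') →
    'N' :: ws = ws ++ ['N']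
  | [], _ => rfl
  | c :: ws, h => by
    have hc : c = 'N' := h c (List.mem_cons_self ..)
    rw [hc, List.cons_append, ← consN_eq_append ws (fun x hx => h x (List.mem_cons_of_mem _ hx))]

theorem main_eq (l : List Char) :
    List.zipWith (fun (s e : Nat) => (e : Int) - (s : Int) + 1) (pvSg false l) (pvEg l) = pvF l := by
  induction hn : l.length using Nat.strong_induction_on generalizing l with
  | _ n ih =>
  match l with
  | [] => simp [pvSg, pvEg, pvF]
  | c :: t =>
    by_cases h : c = 'N'
    · subst h
      set ws := t.takeWhile (· = 'N') with hws
      set rest := t.dropWhile (· = 'N') with hrest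
      have hsplit : t = ws ++ rest := (List.takeWhile_append_dropWhile ..).symm
      have hallN : ∀ x ∈ ws, x = 'N' := by
        intro x hx
        have := List.mem_takeWhile_imp hx
        simpa using this
      have hrhead : rest.getD 0 ' ' ≠ 'N' := by
        cases hr : rest with
        | nil => simp
        | cons d t' =>
          have := head_dropWhile_ne (p := (· = 'N')) t (hrest ▸ hr)
          simpa using this
      have hS : pvSg false ('N' :: t) = 0 :: (pvSg false rest).map (· + (ws.length + 1)) := by
        simp only [pvSg, beq_self_eq_true, Bool.not_false, Bool.and_true, if_true,
          List.cons_append, List.nil_append]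
        rw [hsplit, pvSg_allN ws rest hallN, pvSg_true_eq_false rest hrhead, map_add_add]
      have hE : pvEg ('N' :: t) = ws.length :: (pvEg rest).map (· + (ws.length + 1)) := by
        have : 'N' :: t = ws ++ 'N' :: rest := by
          rw [hsplit, ← List.cons_append, consN_eq_append ws hallN, List.append_assoc]
          rfl
        rw [this, pvEg_run ws rest hallN hrhead]
      rw [hS, hE, List.zipWith_cons_cons, zipShift]
      have hrlen : rest.length < n := by
        have h1 := List.length_dropWhile_le (p := (· = 'N')) (l := t)
        simp only [List.length_cons] at hn
        rw [← hrest] at h1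
        omega
      rw [ih rest.length hrlen rest rfl]
      rw [pvF, if_pos rfl, ← hws, ← hrest]
      congr 1
    · have hc : (c == 'N') = false := by simpa using h
      simp only [pvSg, pvEg, hc, Bool.false_and, Bool.false_eq_true, if_false, List.nil_append]
      rw [zipShift]
      have ht : t.length < n := by simp at hn; omega
      rw [ih t.length ht t rfl, pvF, if_neg h]

-- ===== VERDICT (by name: the statement is the Claim_ definition above) =====
theorem extractNlens_spec : Claim_equal_extractNlens := by
  intro seq _
  unfold Spec_extractNlens extractNlens extractNlens_alt
  rw [pvOuterA_eq, List.nil_append]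
  have hS : (List.range seq.toList.length).filter (pvStartP seq.toList)
      = pvSg false seq.toList := by
    rw [← filter_range_SQ]
    apply List.filter_congr
    intro i _
    exact pvSQ_false seq.toList i
  simp only [hS, filter_range_E, main_eq]
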